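-- pv_equiv track=rewrite | github.com/cienco/mcp-server-motherduck | src/mcp_server_motherduck/app_http.py | _placeholder_count
-- ===== SOURCE A (Python) =====
-- def _placeholder_count(sql: str) -> int:
--     n, in_s, esc = 0, False, False
--     for ch in sql:
--         if in_s:
--             if esc: esc = False
--             elif ch == "\\": esc = True
--             elif ch == "'": in_s = False
--         else:
--             if ch == "'": in_s = True
--             elif ch == "?": n += 1
--     return n
-- ===== SOURCE B (Python) =====
-- def _placeholder_count(sql: str) -> int:
--     n = 0
--     i = 0
--     L = len(sql)
--     while i < L:
--         ch = sql[i]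
--         if ch == "'":
--             i += 1
--             while i < L:
--                 c = sql[i]
--                 if c == "\\":
--                     i += 2
--                 elif c == "'":
--                     i += 1
--                     break
--                 else:
--                     i += 1
--         else:
--             if ch == "?":
--                 n += 1
--             i += 1
--     return n
-- ===== Notes on version B (the rewrite author's own statement) =====
-- stated objective: alternative
-- what changed: Replaces the per-character flag state machine (in_s/esc booleans threaded through one loop) with an index-driven outer loop plus a nested inner loop that consumes a whole quoted string at once, skipping two positions on a backslash.
import Mathlib
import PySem

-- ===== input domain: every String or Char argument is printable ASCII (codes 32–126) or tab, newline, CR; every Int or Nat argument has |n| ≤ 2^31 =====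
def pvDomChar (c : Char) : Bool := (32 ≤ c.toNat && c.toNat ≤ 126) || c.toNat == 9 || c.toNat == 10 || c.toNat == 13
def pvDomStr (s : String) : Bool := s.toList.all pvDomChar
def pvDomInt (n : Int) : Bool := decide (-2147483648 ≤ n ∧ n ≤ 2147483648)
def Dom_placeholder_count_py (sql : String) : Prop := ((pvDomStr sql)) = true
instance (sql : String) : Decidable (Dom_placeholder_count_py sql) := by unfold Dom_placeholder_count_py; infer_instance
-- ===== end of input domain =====

-- B replaces A's flag state machine with an index-driven outer loop and a nested
-- loop that consumes a quoted string at once (objective: alternative decomposition).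


-- ===== PORT A =====
-- one step of A's for-loop body over the state (n, in_s, esc)
def pcAStep (s : Int × Bool × Bool) (ch : Char) : Int × Bool × Bool :=
  let (n, in_s, esc) := s
  if in_s then
    if esc then (n, in_s, false)
    else if ch = '\\' then (n, in_s, true)
    else if ch = '\'' then (n, false, esc)
    else (n, in_s, esc)
  else
    if ch = '\'' then (n, true, esc)
    else if ch = '?' then (n + 1, in_s, esc)
    else (n, in_s, esc)

def placeholder_count_py (sql : String) : Int :=
  (sql.toList.foldl pcAStep (0, false, false)).1

-- ===== PORT B =====
-- B's inner while loop: consume the rest of a quoted string (i += 2 on a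
-- backslash ↔ drop the head and its tail's head), return the remaining input.
def pcConsume : List Char → List Char
  | [] => []
  | c :: rest =>
    if c = '\\' then pcConsume rest.tail
    else if c = '\'' then rest
    else pcConsume rest
termination_by l => l.length
decreasing_by all_goals (cases rest <;> simp)

lemma pcConsume_length_le_aux : ∀ (k : Nat) (l : List Char), l.length ≤ k →
    (pcConsume l).length ≤ l.length := by
  intro k
  induction k with
  | zero =>
      intro l h
      have hl : l = [] := by cases l <;> simp_all
      subst hl; simp [pcConsume]
  | succ k ih =>
      intro l h
      match l with
      | [] => simp [pcConsume]
      | c :: rest =>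
        by_cases hb : c = '\\'
        · subst hb
          simp [pcConsume]
          have ht : rest.tail.length ≤ rest.length := by cases rest <;> simp
          have := ih rest.tail (by simp at h; omega)
          omega
        · by_cases hq : c = '\''
          · subst hq; simp [pcConsume, hb]
          · simp only [pcConsume, if_neg hb, if_neg hq, List.length_cons]
            have := ih rest (by simp at h; omega)
            omega

lemma pcConsume_length_le (l : List Char) : (pcConsume l).length ≤ l.length :=
  pcConsume_length_le_aux l.length l le_rfl

-- B's outer while loop over the remaining input
def pcBLoop : List Char → Int
  | [] => 0
  | c :: rest =>
    if c = '\'' then pcBLoop (pcConsume rest)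
    else if c = '?' then 1 + pcBLoop rest
    else pcBLoop rest
termination_by l => l.length
decreasing_by
  · have := pcConsume_length_le rest; simp; omega
  · simp
  · simp

def placeholder_count_py_alt (sql : String) : Int := pcBLoop sql.toList

-- ===== PRECONDITION & SPEC =====
def Spec_placeholder_count_py (sql : String) (out : Int) : Prop := out = placeholder_count_py_alt sql
instance (sql : String) (out : Int) : Decidable (Spec_placeholder_count_py sql out) := by unfold Spec_placeholder_count_py; infer_instance

-- ===== CLAIM (what is proved, stated in full; the proofs are below) =====
def Claim_equal_placeholder_count_py : Prop := ∀ (sql : String), Dom_placeholder_count_py sql → Spec_placeholder_count_py sql (placeholder_count_py sql)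

-- ===== LEMMAS AND PROOFS =====
-- A's in-string run equals: consume the quoted part, continue out-of-string.
lemma pcA_in_eq_consume : ∀ (k : Nat) (l : List Char) (n : Int), l.length ≤ k →
    (l.foldl pcAStep (n, true, false)).1 = ((pcConsume l).foldl pcAStep (n, false, false)).1 := by
  intro k
  induction k with
  | zero =>
      intro l n h
      have hl : l = [] := by cases l <;> simp_all
      subst hl; simp [pcConsume]
  | succ k ih =>
      intro l n h
      match l with
      | [] => simp [pcConsume]
      | c :: rest =>
        by_cases hb : c = '\\'
        · subst hb
          rw [List.foldl_cons]
          have h1 : pcAStep (n, true, false) '\\' = (n, true, true) := by simp [pcAStep]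
          have h2 : pcConsume ('\\' :: rest) = pcConsume rest.tail := by simp [pcConsume]
          rw [h1, h2]
          match rest with
          | [] => simp [pcConsume]
          | d :: rest' =>
              rw [List.foldl_cons]
              have h3 : pcAStep (n, true, true) d = (n, true, false) := by simp [pcAStep]
              rw [h3]
              simp only [List.tail_cons]
              exact ih rest' n (by simp at h; omega)
        · by_cases hq : c = '\''
          · subst hq
            simp [List.foldl_cons, pcAStep, pcConsume]
          · simp [List.foldl_cons, pcAStep, pcConsume, hb, hq]
            exact ih rest n (by simp at h; omega)

lemma pcA_out_eq_B : ∀ (k : Nat) (l : List Char) (n : Int), l.length ≤ k →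
    (l.foldl pcAStep (n, false, false)).1 = n + pcBLoop l := by
  intro k
  induction k with
  | zero =>
      intro l n h
      have hl : l = [] := by cases l <;> simp_all
      subst hl; simp [pcBLoop]
  | succ k ih =>
      intro l n h
      match l with
      | [] => simp [pcBLoop]
      | c :: rest =>
        by_cases hq : c = '\''
        · subst hq
          simp only [List.foldl_cons]
          simp [pcAStep, pcBLoop]
          rw [pcA_in_eq_consume rest.length rest n le_rfl]
          exact ih (pcConsume rest) n
            (by have := pcConsume_length_le rest; simp at h; omega)
        · by_cases hp : c = '?'
          · subst hp
            simp only [List.foldl_cons]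
            simp [pcAStep, pcBLoop]
            rw [ih rest (n + 1) (by simp at h; omega)]
            ring
          · simp only [List.foldl_cons]
            simp [pcAStep, pcBLoop, hq, hp]
            exact ih rest n (by simp at h; omega)

-- ===== VERDICT (by name: the statement is the Claim_ definition above) =====
theorem placeholder_count_py_spec : Claim_equal_placeholder_count_py := by
  intro sql _
  unfold Spec_placeholder_count_py placeholder_count_py placeholder_count_py_alt
  have := pcA_out_eq_B sql.toList.length sql.toList 0 le_rfl
  omega
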